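-- pv_equiv track=rewrite | github.com/Watanai1245/Data-Structure | Chapter10__Searching/Chapter10_5.py | MWeight
-- ===== SOURCE A (Python) =====
-- def MWeight(lst, box):
--     if box == 1:
--         return sum(lst)
--
--     minWeight = 99999
--     for index in range(len(lst)):
--
--         if len(lst[index:]) < box-1:
--             break
--
--         leftV = sum(lst[:index])
--         rightV = MWeight(lst[index:], box - 1)
--
--         minWeight = min(max(leftV, rightV), minWeight)
--
--     return minWeight
-- ===== SOURCE B (Python) =====
-- def MWeight(lst, box):
--     if box == 1:
--         return sum(lst)
--     n = len(lst)
--     if box - 1 > n: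
--         return 99999
--     prefix = [0]
--     total = 0
--     for x in lst:
--         total += x
--         prefix.append(total)
--     # dp[s] = best value for splitting lst[s:] into 1 group (= its sum)
--     dp = [prefix[n] - prefix[s] for s in range(n + 1)]
--     for k in range(2, box + 1):
--         ndp = []
--         for s in range(n + 1):
--             best = 99999
--             for t in range(s, n - k + 2):
--                 best = min(best, max(prefix[t] - prefix[s], dp[t]))
--             ndp.append(best)
--         dp = ndp
--     return dp[0]
-- ===== Notes on version B (the rewrite author's own statement) =====
-- stated objective: alternative
-- what changed: Replaces A's recursion over all split points (re-entering MWeight on every suffix) by a bottom-up dynamic program over prefix sums: dp[k][s] = min over t of max(prefix[t]-prefix[s], dp[k-1][t]).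
-- outside the precondition, e.g. on MWeight([], 0): A returns 99999, B returns 0
import Mathlib
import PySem

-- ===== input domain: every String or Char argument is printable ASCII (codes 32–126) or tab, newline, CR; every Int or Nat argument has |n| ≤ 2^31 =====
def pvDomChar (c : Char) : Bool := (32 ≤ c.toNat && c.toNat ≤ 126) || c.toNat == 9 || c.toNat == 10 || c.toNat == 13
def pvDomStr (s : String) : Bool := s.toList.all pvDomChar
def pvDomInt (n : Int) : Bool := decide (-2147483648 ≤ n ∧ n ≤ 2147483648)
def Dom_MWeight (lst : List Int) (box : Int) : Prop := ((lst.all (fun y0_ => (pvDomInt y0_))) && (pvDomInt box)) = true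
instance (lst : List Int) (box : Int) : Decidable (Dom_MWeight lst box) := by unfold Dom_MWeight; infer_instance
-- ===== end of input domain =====

-- B computes the same value as a bottom-up dynamic program over prefix sums instead of A's recursion over all split points.

-- ===== PORT A =====
-- literal transliteration of A: recursion on box with an index loop that breaks
-- when the remaining suffix is shorter than box-1.
mutual
def MWeight (lst : List Int) (box : Int) : Int :=
  if box = 1 then lst.sum
  else MWeightLoopA lst box 0 99999
termination_by (box.toNat, lst.length + 2)

def MWeightLoopA (lst : List Int) (box : Int) (index : Nat) (minWeight : Int) : Int :=
  if index < lst.length then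
    if ((lst.length : Int) - index) < box - 1 then minWeight   -- break
    else
      let leftV := (lst.take index).sum
      -- the '2 ≤ box' guard only makes the recursion total: Python diverges for box ≤ 0
      -- (outside Pre_) and never reaches this line with box = 1
      let rightV := if 2 ≤ box then MWeight (lst.drop index) (box - 1) else 0
      MWeightLoopA lst box (index + 1) (min (max leftV rightV) minWeight)
  else minWeight
termination_by (box.toNat, lst.length - index + 1)
end

-- ===== PORT B =====
-- transliteration of Source B: prefix sums, then dp over group counts k = 2 .. box.
def MWeight_alt (lst : List Int) (box : Int) : Int :=
  if box = 1 then lst.sum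
  else
    let n := lst.length
    if (n : Int) < box - 1 then 99999
    else
      -- prefix = [0]; total = 0; for x in lst: total += x; prefix.append(total)
      let pr := (lst.foldl (fun st x => (st.1 ++ [st.2 + x], st.2 + x)) (([0] : List Int), (0 : Int))).1
      -- dp = [prefix[n] - prefix[s] for s in range(n+1)]   (indices are in range)
      let dp0 := (List.range (n + 1)).map (fun s => pr.getD n 0 - pr.getD s 0)
      -- for k in range(2, box+1): k = i + 2; inner t-range range(s, n-k+2) has n+2-(i+2)-s entries
      let dpf := (List.range (box - 1).toNat).foldl (fun dp i =>
          (List.range (n + 1)).map (fun s =>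
            (List.range' s (n + 2 - (i + 2) - s)).foldl
              (fun best t => min best (max (pr.getD t 0 - pr.getD s 0) (dp.getD t 0))) 99999)) dp0
      dpf.getD 0 0

-- ===== PRECONDITION & SPEC =====
-- Pre_ excludes box ≤ 0: there A recurses forever (RecursionError) on every nonempty lst;
-- in the single returning case lst = [] its 99999 is an accidental sentinel (B returns sum(lst) = 0).
def Pre_MWeight (lst : List Int) (box : Int) : Prop := 1 ≤ box
instance (lst : List Int) (box : Int) : Decidable (Pre_MWeight lst box) := by unfold Pre_MWeight; infer_instance
def pvWitness_MWeight : List Int × Int := ([3, 1, 2], 2)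

def Spec_MWeight (lst : List Int) (box : Int) (out : Int) : Prop := out = MWeight_alt lst box
instance (lst : List Int) (box : Int) (out : Int) : Decidable (Spec_MWeight lst box out) := by unfold Spec_MWeight; infer_instance

-- ===== CLAIM (what is proved, stated in full; the proofs are below) =====
def Claim_equal_MWeight : Prop := ∀ (lst : List Int) (box : Int), Dom_MWeight lst box → Pre_MWeight lst box → Spec_MWeight lst box (MWeight lst box)

-- ===== LEMMAS AND PROOFS =====

-- the common mathematical value: MWG k lst = A's value for box = k+1
def MWG : Nat → List Int → Int
  | 0, lst => lst.sum
  | (k + 1), lst => (List.range (lst.length - k)).foldl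
      (fun m t => min (max ((lst.take t).sum) (MWG k (lst.drop t))) m) 99999

-- ---- A-side: the loop with break is a fold over the surviving indices ----
lemma loopA_eq (k : Nat) : ∀ fuel (lst : List Int) (index : Nat) (m : Int),
    lst.length - index = fuel →
    MWeightLoopA lst ((k : Int) + 2) index m =
      (List.range' index (lst.length - k - index)).foldl
        (fun m t => min (max ((lst.take t).sum) (MWeight (lst.drop t) ((k : Int) + 1))) m) m := by
  intro fuel
  induction fuel with
  | zero =>
    intro lst index m h
    rw [MWeightLoopA]
    have h1 : ¬ index < lst.length := by omega
    have h2 : lst.length - k - index = 0 := by omega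
    simp [h1, h2]
  | succ f ih =>
    intro lst index m h
    rw [MWeightLoopA]
    have h1 : index < lst.length := by omega
    simp only [h1, if_true]
    by_cases hb : ((lst.length : Int) - index) < ((k : Int) + 2) - 1
    · have h2 : lst.length - k - index = 0 := by omega
      simp [hb, h2]
    · have h2 : lst.length - k - index = (lst.length - k - (index + 1)) + 1 := by omega
      have h3 : (2 : Int) ≤ (k : Int) + 2 := by omega
      simp only [hb, if_false, h3, if_true]
      rw [h2, List.range'_succ]
      simp only [List.foldl_cons]
      have h4 : ((k : Int) + 2) - 1 = (k : Int) + 1 := by ring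
      rw [h4]
      exact ih lst (index + 1) _ (by omega)

lemma A_eq_MWG : ∀ (k : Nat) (lst : List Int), MWeight lst ((k : Int) + 1) = MWG k lst := by
  intro k
  induction k with
  | zero =>
    intro lst
    rw [MWeight]
    norm_num [MWG]
  | succ k ih =>
    intro lst
    rw [MWeight]
    have h1 : ¬ (((k + 1 : Nat) : Int) + 1 = 1) := by push_cast; omega
    simp only [h1, if_false]
    have hc : ((k + 1 : Nat) : Int) + 1 = (k : Int) + 2 := by push_cast; ring
    rw [hc, loopA_eq k (lst.length - 0) lst 0 99999 rfl]
    have hbody : (fun (m : Int) (t : Nat) =>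
        min (max ((lst.take t).sum) (MWeight (lst.drop t) ((k : Int) + 1))) m) =
        (fun (m : Int) (t : Nat) => min (max ((lst.take t).sum) (MWG k (lst.drop t))) m) := by
      funext m t; rw [ih]
    rw [hbody, MWG]
    rw [List.range_eq_range']
    norm_num

-- ---- B-side ----
lemma prefix_foldl (l : List Int) : ∀ (p : List Int) (t : Int),
    l.foldl (fun st x => (st.1 ++ [st.2 + x], st.2 + x)) (p, t) =
      (p ++ (List.range l.length).map (fun i => t + (l.take (i + 1)).sum), t + l.sum) := by
  induction l with
  | nil => intro p t; simp
  | cons x xs ih =>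
    intro p t
    simp only [List.foldl_cons]
    rw [ih]
    refine Prod.ext ?_ ?_
    · simp only [List.length_cons, List.range_succ_eq_map, List.map_cons, List.map_map]
      simp [Function.comp_def, List.append_assoc, add_assoc]
    · simp [add_assoc]

lemma prefix_val (lst : List Int) :
    (lst.foldl (fun st x => (st.1 ++ [st.2 + x], st.2 + x)) (([0] : List Int), (0 : Int))).1 =
      (List.range (lst.length + 1)).map (fun i => (lst.take i).sum) := by
  rw [prefix_foldl]
  simp [List.range_succ_eq_map, List.map_map, Function.comp_def]

lemma sum_take_sub (lst : List Int) (s t : Nat) (h : s ≤ t) :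
    (lst.take t).sum - (lst.take s).sum = ((lst.drop s).take (t - s)).sum := by
  obtain ⟨d, rfl⟩ : ∃ d, t = s + d := ⟨t - s, by omega⟩
  rw [List.take_add, List.sum_append]
  have h2 : s + d - s = d := by omega
  rw [h2]
  ring

-- one k-iteration of the dp loop
lemma dp_step (lst : List Int) (i : Nat) (dp : List Int)
    (hdp : dp = (List.range (lst.length + 1)).map (fun s => MWG i (lst.drop s))) :
    (List.range (lst.length + 1)).map (fun s =>
      (List.range' s (lst.length + 2 - (i + 2) - s)).foldl
        (fun best t => min best
          (max ((((List.range (lst.length + 1)).map (fun j => (lst.take j).sum)).getD t 0) -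
                (((List.range (lst.length + 1)).map (fun j => (lst.take j).sum)).getD s 0))
               (dp.getD t 0))) 99999) =
    (List.range (lst.length + 1)).map (fun s => MWG (i + 1) (lst.drop s)) := by
  apply List.map_congr_left
  intro s hs
  rw [List.mem_range] at hs
  have hsn : s ≤ lst.length := by omega
  have hc : lst.length + 2 - (i + 2) - s = (lst.drop s).length - i := by
    rw [List.length_drop]; omega
  rw [hc, MWG, List.range'_eq_map_range, List.foldl_map]
  apply PySem.List.foldl_congr_mem
  intro acc t' ht'
  rw [List.mem_range] at ht'
  have htn : s + t' ≤ lst.length := by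
    have := List.length_drop (i := s) (l := lst); omega
  rw [PySem.List.getD_map_range _ _ _ _ (by omega : s + t' < lst.length + 1)]
  rw [PySem.List.getD_map_range _ _ _ _ (by omega : s < lst.length + 1)]
  rw [hdp, PySem.List.getD_map_range _ _ _ _ (by omega : s + t' < lst.length + 1)]
  have h1 : (lst.take (s + t')).sum - (lst.take s).sum = ((lst.drop s).take t').sum := by
    rw [sum_take_sub lst s (s + t') (by omega)]
    norm_num
  have h2 : lst.drop (s + t') = (lst.drop s).drop t' := by
    rw [List.drop_drop]
  rw [h1, h2, min_comm]

lemma dp_inv (lst : List Int) : ∀ (j : Nat),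
    (List.range j).foldl (fun dp i =>
      (List.range (lst.length + 1)).map (fun s =>
        (List.range' s (lst.length + 2 - (i + 2) - s)).foldl
          (fun best t => min best
            (max ((((List.range (lst.length + 1)).map (fun j => (lst.take j).sum)).getD t 0) -
                  (((List.range (lst.length + 1)).map (fun j => (lst.take j).sum)).getD s 0))
                 (dp.getD t 0))) 99999))
      ((List.range (lst.length + 1)).map (fun s =>
        (((List.range (lst.length + 1)).map (fun j => (lst.take j).sum)).getD lst.length 0) -
        (((List.range (lst.length + 1)).map (fun j => (lst.take j).sum)).getD s 0)))
    = (List.range (lst.length + 1)).map (fun s => MWG j (lst.drop s)) := by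
  intro j
  induction j with
  | zero =>
    simp only [List.range_zero, List.foldl_nil]
    apply List.map_congr_left
    intro s hs
    rw [List.mem_range] at hs
    rw [PySem.List.getD_map_range _ _ _ _ (by omega : lst.length < lst.length + 1)]
    rw [PySem.List.getD_map_range _ _ _ _ (by omega : s < lst.length + 1)]
    simp only [List.take_length, MWG]
    have := List.sum_take_add_sum_drop lst s
    omega
  | succ j ih =>
    rw [show List.range (j + 1) = List.range j ++ [j] from List.range_succ]
    rw [List.foldl_append, List.foldl_cons, List.foldl_nil, ih]
    exact dp_step lst j _ rfl

lemma B_eq_MWG : ∀ (k : Nat) (lst : List Int), MWeight_alt lst ((k : Int) + 1) = MWG k lst := by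
  intro k lst
  cases k with
  | zero =>
    rw [MWeight_alt]
    norm_num [MWG]
  | succ k =>
    rw [MWeight_alt]
    have h1 : ¬ (((k + 1 : Nat) : Int) + 1 = 1) := by push_cast; omega
    simp only [h1, if_false]
    by_cases h2 : ((lst.length : Nat) : Int) < (((k + 1 : Nat) : Int) + 1) - 1
    · have hnk : lst.length ≤ k := by push_cast at h2; omega
      simp only [h2, if_true]
      rw [MWG]
      have : lst.length - k = 0 := by omega
      rw [this]
      simp
    · simp only [h2, if_false]
      have h3 : ((((k + 1 : Nat) : Int) + 1) - 1).toNat = k + 1 := by push_cast; omega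
      rw [prefix_val, h3, dp_inv lst (k + 1)]
      rw [PySem.List.getD_map_range _ _ _ _ (by omega : 0 < lst.length + 1)]
      rw [List.drop_zero]

-- ===== VERDICT (by name: the statement is the Claim_ definition above) =====
theorem MWeight_spec : Claim_equal_MWeight := by
  intro lst box _ hpre
  have hk : box = ((box.toNat - 1 : Nat) : Int) + 1 := by
    unfold Pre_MWeight at hpre; omega
  unfold Spec_MWeight
  rw [hk, A_eq_MWG, B_eq_MWG]
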